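-- pv_equiv track=rewrite | github.com/AMP-SCZ/qqc | qqc/qqc/json.py | get_diff_dict_only
-- ===== SOURCE A (Python) =====
-- def get_diff_dict_only(dict_in: dict, dict_template: dict) -> dict:
--     diff_dict = {}
--     for k, v in dict_in.items():
--         if k in dict_template:
--             if dict_in[k] != dict_template[k]:
--                 diff_dict[k] = v
--         else:
--             diff_dict[k] = v
--
--     return diff_dict
-- ===== SOURCE B (Python) =====
-- def get_diff_dict_only(dict_in: dict, dict_template: dict) -> dict:
--     # Subtractive formulation: start from a copy of dict_in and prune
--     # the entries the template already has with the same value.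
--     diff_dict = dict(dict_in)
--     for k, v in dict_template.items():
--         if k in diff_dict and diff_dict[k] == v:
--             del diff_dict[k]
--     return diff_dict
-- ===== Notes on version B (the rewrite author's own statement) =====
-- stated objective: alternative
-- what changed: B starts from a shallow copy of dict_in and loops over dict_template, deleting each entry the template matches exactly, instead of A's loop over dict_in that accumulates kept entries into a fresh dict.
import Mathlib
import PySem

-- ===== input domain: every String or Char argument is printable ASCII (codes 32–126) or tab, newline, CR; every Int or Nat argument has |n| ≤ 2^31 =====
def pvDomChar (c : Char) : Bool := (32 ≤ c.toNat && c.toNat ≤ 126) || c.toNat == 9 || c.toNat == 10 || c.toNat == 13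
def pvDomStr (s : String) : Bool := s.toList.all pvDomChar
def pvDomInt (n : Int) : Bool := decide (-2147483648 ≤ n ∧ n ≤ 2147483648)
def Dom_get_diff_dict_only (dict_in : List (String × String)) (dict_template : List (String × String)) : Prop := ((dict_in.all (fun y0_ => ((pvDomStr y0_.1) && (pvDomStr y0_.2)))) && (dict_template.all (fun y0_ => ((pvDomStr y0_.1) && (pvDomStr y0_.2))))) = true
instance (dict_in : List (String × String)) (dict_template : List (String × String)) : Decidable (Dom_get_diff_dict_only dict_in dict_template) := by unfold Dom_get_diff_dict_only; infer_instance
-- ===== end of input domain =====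

-- B rewrites A's accumulate-the-kept-entries loop over dict_in as a subtractive loop over
-- dict_template that prunes exact matches from a copy of dict_in (alternative decomposition;
-- equal in the return value; neither mutates its arguments).

-- ===== PORT A =====
def get_diff_dict_only (dict_in : List (String × String)) (dict_template : List (String × String)) : List (String × String) :=
  (dict_in.foldl (fun diff kv =>
      match (PySem.Dict.mk dict_template).get? kv.1 with
      | some tv =>
          -- dict_in[k] cannot raise here: kv comes from dict_in itself
          if (PySem.Dict.mk dict_in).getD kv.1 kv.2 ≠ tv then diff.insert kv.1 kv.2 else diff
      | none => diff.insert kv.1 kv.2)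
    (PySem.Dict.empty : PySem.Dict String String)).items

-- ===== PORT B =====
def get_diff_dict_only_alt (dict_in : List (String × String)) (dict_template : List (String × String)) : List (String × String) :=
  (dict_template.foldl (fun diff kv =>
      if diff.get? kv.1 = some kv.2 then diff.erase kv.1 else diff)
    (PySem.Dict.mk dict_in)).items

-- ===== PRECONDITION & SPEC =====
-- Pre_ requires distinct keys in each association list: the lists encode Python dicts (whose keys
-- are always unique), so duplicate-key lists never arise as inputs of A.
def Pre_get_diff_dict_only (dict_in : List (String × String)) (dict_template : List (String × String)) : Prop :=
  (dict_in.map Prod.fst).Nodup ∧ (dict_template.map Prod.fst).Nodup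
instance (dict_in : List (String × String)) (dict_template : List (String × String)) : Decidable (Pre_get_diff_dict_only dict_in dict_template) := by unfold Pre_get_diff_dict_only; infer_instance

def pvWitness_get_diff_dict_only : (List (String × String)) × (List (String × String)) :=
  ([("a", "1"), ("b", "2")], [("a", "1"), ("c", "3")])

def Spec_get_diff_dict_only (dict_in : List (String × String)) (dict_template : List (String × String)) (out : List (String × String)) : Prop := out = get_diff_dict_only_alt dict_in dict_template
instance (dict_in : List (String × String)) (dict_template : List (String × String)) (out : List (String × String)) : Decidable (Spec_get_diff_dict_only dict_in dict_template out) := by unfold Spec_get_diff_dict_only; infer_instance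

-- ===== CLAIM (what is proved, stated in full; the proofs are below) =====
def Claim_equal_get_diff_dict_only : Prop := ∀ (dict_in : List (String × String)) (dict_template : List (String × String)), Dom_get_diff_dict_only dict_in dict_template → Pre_get_diff_dict_only dict_in dict_template → Spec_get_diff_dict_only dict_in dict_template (get_diff_dict_only dict_in dict_template)

-- ===== LEMMAS AND PROOFS =====

-- the common keep-predicate: an entry of dict_in survives iff the template does not map its key
-- to exactly its value
def pvKeep (dict_template : List (String × String)) (kv : String × String) : Bool :=
  !((PySem.Dict.mk dict_template).get? kv.1 == some kv.2)

-- A's branch condition as a boolean predicate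
def pvKeepA (dict_in dict_template : List (String × String)) (kv : String × String) : Bool :=
  match (PySem.Dict.mk dict_template).get? kv.1 with
  | some tv => decide ((PySem.Dict.mk dict_in).getD kv.1 kv.2 ≠ tv)
  | none => true

-- A's loop: conditional inserts of fresh distinct keys into an accumulator = filter
theorem pv_foldl_ite_insert (l : List (String × String)) (f : String × String → Bool)
    (d : PySem.Dict String String)
    (hfresh : ∀ a ∈ l, d.contains a.1 = false) (hnd : (l.map Prod.fst).Nodup) :
    (l.foldl (fun d kv => if f kv then d.insert kv.1 kv.2 else d) d).items
      = d.items ++ l.filter f := by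
  induction l generalizing d with
  | nil => simp
  | cons a t ih =>
    simp only [List.map_cons, List.nodup_cons] at hnd
    have hda : d.contains a.1 = false := hfresh a (by simp)
    rw [List.foldl_cons, List.filter_cons]
    by_cases hf : f a = true
    · rw [if_pos hf, if_pos hf]
      rw [ih (d.insert a.1 a.2) (fun b hb => by
        rw [PySem.Dict.contains_insert]
        have hb1 : b.1 ≠ a.1 := fun h => hnd.1 (h ▸ List.mem_map_of_mem hb)
        simp [hb1, hfresh b (List.mem_cons_of_mem _ hb)]) hnd.2]
      rw [PySem.Dict.items_insert_of_not_contains d a.2 hda]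
      simp
    · rw [if_neg hf, if_neg hf]
      exact ih d (fun b hb => hfresh b (List.mem_cons_of_mem _ hb)) hnd.2

-- B's loop: conditional erases driven by a distinct-key template = filter by pvKeep
theorem pv_foldl_erase (dt : List (String × String)) (d : PySem.Dict String String)
    (hd : d.keys.Nodup) (hdt : (dt.map Prod.fst).Nodup) :
    (dt.foldl (fun d kv => if d.get? kv.1 = some kv.2 then d.erase kv.1 else d) d).items
      = d.items.filter (pvKeep dt) := by
  induction dt generalizing d with
  | nil =>
    rw [List.foldl_nil]
    refine (List.filter_eq_self.2 ?_).symm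
    intro a _
    simp [pvKeep, PySem.Dict.get?]
  | cons p t ih =>
    obtain ⟨pk, pv⟩ := p
    simp only [List.map_cons, List.nodup_cons] at hdt
    rw [List.foldl_cons]
    by_cases h : d.get? pk = some pv
    · rw [if_pos h]
      have hkeys : (d.erase pk).keys.Nodup := by
        refine hd.sublist ?_
        simp only [PySem.Dict.keys, PySem.Dict.erase]
        exact List.Sublist.map _ List.filter_sublist
      rw [ih (d.erase pk) hkeys hdt.2]
      have herase : (d.erase pk).items = d.items.filter (fun kv => !(kv.1 == pk)) := rfl
      rw [herase, List.filter_filter]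
      apply List.filter_congr
      intro kv hkv
      by_cases hk : kv.1 = pk
      · have hv : kv.2 = pv := by
          have hh := PySem.Dict.get?_of_mem_items d hkv hd
          rw [hk, h] at hh
          exact (Option.some.inj hh).symm
        simp [pvKeep, PySem.Dict.get?_mk_cons, hk, hv]
      · simp only [pvKeep, PySem.Dict.get?_mk_cons]
        simp [Ne.symm hk]
        exact fun _ => hk
    · rw [if_neg h]
      rw [ih d hd hdt.2]
      apply List.filter_congr
      intro kv hkv
      by_cases hk : kv.1 = pk
      · have hget : d.get? kv.1 = some kv.2 := PySem.Dict.get?_of_mem_items d hkv hd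
        have hv : pv ≠ kv.2 := by
          intro hv; apply h; rw [← hk, hget, hv]
        have hnone : (PySem.Dict.mk t).get? kv.1 = none := by
          rw [PySem.Dict.get?_eq_none_iff_not_mem_keys, PySem.Dict.keys_mk]
          rw [hk]; exact hdt.1
        simp only [pvKeep, PySem.Dict.get?_mk_cons]
        simp [hk, hv]
        rw [← hk]
        simp [hnone]
      · simp [pvKeep, PySem.Dict.get?_mk_cons, Ne.symm hk]

theorem get_diff_dict_only_spec : Claim_equal_get_diff_dict_only := by
  intro din dt _ hpre
  unfold Spec_get_diff_dict_only get_diff_dict_only get_diff_dict_only_alt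
  obtain ⟨h1, h2⟩ := hpre
  -- B side
  rw [pv_foldl_erase dt (PySem.Dict.mk din) (by rw [PySem.Dict.keys_mk]; exact h1) h2]
  -- A side: the match-step is a conditional insert by the predicate pvKeepA
  have hstep : (fun (diff : PySem.Dict String String) (kv : String × String) =>
      match (PySem.Dict.mk dt).get? kv.1 with
      | some tv => if (PySem.Dict.mk din).getD kv.1 kv.2 ≠ tv then diff.insert kv.1 kv.2 else diff
      | none => diff.insert kv.1 kv.2)
      = (fun diff kv => if pvKeepA din dt kv then diff.insert kv.1 kv.2 else diff) := by
    funext diff kv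
    unfold pvKeepA
    rcases hg : (PySem.Dict.mk dt).get? kv.1 with _ | tv
    · simp
    · dsimp only
      by_cases hne : (PySem.Dict.mk din).getD kv.1 kv.2 ≠ tv
      · rw [if_pos hne, if_pos (by simpa using hne)]
      · rw [if_neg hne, if_neg (by simpa using hne)]
  rw [hstep, pv_foldl_ite_insert din _ PySem.Dict.empty (fun a _ => PySem.Dict.contains_empty a.1) h1]
  show din.filter _ = List.filter (pvKeep dt) din
  apply List.filter_congr
  intro kv hkv
  have hgd : (PySem.Dict.mk din).getD kv.1 kv.2 = kv.2 :=
    PySem.Dict.getD_of_mem_items (PySem.Dict.mk din) hkv (by rw [PySem.Dict.keys_mk]; exact h1) kv.2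
  unfold pvKeepA
  rcases hg : (PySem.Dict.mk dt).get? kv.1 with _ | tv
  · simp [pvKeep, hg]
  · by_cases hvv : tv = kv.2
    · simp [pvKeep, hg, hgd, hvv]
    · simp [pvKeep, hg, hgd, hvv, Ne.symm hvv]
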